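-- pv_equiv track=rewrite | github.com/ToniFeliudeC/codewars-solutions | python/6kyu/change-it-up.py | changer
-- ===== SOURCE A (Python) =====
-- def changer(s):
--
--     #The offset string is going to storage the "s" string wit each letter replace with the letter following in the alphabet.
--     #The consonants lower is going to storage the "offset" string with all vowels capital and all consonants lower case.
--     alphabet = "abcdefghijklmnopqrstuvwxyza"
--     offset = ""
--     consonantsLower = ""
--
--     #We loop through each character of the "s" string and add its following letter on the alphabet to "offset" in case it's a letter.
--     #Otherwise we just add the same character, since that would mean it's a digit or a symbol.
--     for i in s:
--         if i.lower() in alphabet: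
--             offset += alphabet[alphabet.index(i.lower()) + 1]
--         else:
--             offset += i
--
--     #Finally we make each letter capital or lower case depending on if it's vowel or consonant.
--     for i in offset:
--         if i in "aeiou":
--             consonantsLower += i.upper()
--         else:
--             consonantsLower += i.lower()
--
--     return consonantsLower
-- ===== SOURCE B (Python) =====
-- VOWELS = set("aeiou")
--
-- def changer(s):
--     # Precomputed table: each lowercase letter -> shifted-by-one char,
--     # uppercased if the shifted letter is a vowel.
--     table = {}
--     for i in range(26):
--         c = chr(ord('a') + i)
--         sh = chr(ord('a') + (i + 1) % 26)
--         table[c] = sh.upper() if sh in VOWELS else sh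
--     return ''.join(table.get(c.lower(), c.lower()) for c in s)
-- ===== Notes on version B (the rewrite author's own statement) =====
-- stated objective: simpler
-- what changed: Replaced A's two sequential string-building passes with an alphabet.index scan per letter by a precomputed 26-entry lookup table (shift + vowel-uppercase baked in) applied in a single join over the string.
import Mathlib
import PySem

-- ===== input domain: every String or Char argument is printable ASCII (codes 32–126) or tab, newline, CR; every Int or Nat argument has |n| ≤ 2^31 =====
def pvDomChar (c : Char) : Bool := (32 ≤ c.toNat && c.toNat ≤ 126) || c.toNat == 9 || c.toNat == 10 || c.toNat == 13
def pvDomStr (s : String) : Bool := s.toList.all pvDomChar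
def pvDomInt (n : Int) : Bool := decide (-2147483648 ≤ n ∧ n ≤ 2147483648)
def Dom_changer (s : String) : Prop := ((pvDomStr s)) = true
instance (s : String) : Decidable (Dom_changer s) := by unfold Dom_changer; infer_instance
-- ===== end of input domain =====

set_option maxRecDepth 4000


-- B replaces A's two string-building passes (with an alphabet.index scan per letter)
-- by a precomputed 26-entry table applied in one pass; objective: simpler.

-- ===== PORT A =====
def changerAlphabet : List Char := "abcdefghijklmnopqrstuvwxyza".toList

def changer (s : String) : String :=
  let offset : List Char := s.toList.foldl (fun acc i =>
    if PySem.Chars.lowerChar i ∈ changerAlphabet then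
      acc ++ (PySem.List.pyGet? changerAlphabet
        (((PySem.List.index? changerAlphabet (PySem.Chars.lowerChar i)).getD 0 : Int) + 1)).toList
    else
      acc ++ [i]) []
  let consonantsLower : List Char := offset.foldl (fun acc i =>
    if i ∈ "aeiou".toList then
      acc ++ [PySem.Chars.upperChar i]
    else
      acc ++ [PySem.Chars.lowerChar i]) []
  String.ofList consonantsLower

-- ===== PORT B =====
def changerTable : PySem.Dict Char Char :=
  (PySem.List.pyRange 0 26 1).foldl (fun t i =>
    let c := Char.ofNat ('a'.toNat + i.toNat)
    let sh := Char.ofNat ('a'.toNat + (i.toNat + 1) % 26)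
    t.insert c (if sh ∈ "aeiou".toList then PySem.Chars.upperChar sh else sh)) PySem.Dict.empty

def changer_alt (s : String) : String :=
  String.ofList (s.toList.map (fun c =>
    let k := PySem.Chars.lowerChar c
    (changerTable.get? k).getD k))

-- ===== PRECONDITION & SPEC =====
def Spec_changer (s : String) (out : String) : Prop := out = changer_alt s
instance (s : String) (out : String) : Decidable (Spec_changer s out) := by unfold Spec_changer; infer_instance

-- ===== CLAIM (what is proved, stated in full; the proofs are below) =====
def Claim_equal_changer : Prop := ∀ (s : String), Dom_changer s → Spec_changer s (changer s)

-- ===== LEMMAS AND PROOFS =====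

-- the per-character function of A's first pass
def pvStepA1 (i : Char) : List Char :=
  if PySem.Chars.lowerChar i ∈ changerAlphabet then
    (PySem.List.pyGet? changerAlphabet
      (((PySem.List.index? changerAlphabet (PySem.Chars.lowerChar i)).getD 0 : Int) + 1)).toList
  else [i]

-- the per-character function of A's second pass
def pvStepA2 (i : Char) : Char :=
  if i ∈ "aeiou".toList then PySem.Chars.upperChar i else PySem.Chars.lowerChar i

-- the per-character function of B
def pvStepB (c : Char) : Char :=
  let k := PySem.Chars.lowerChar c
  (changerTable.get? k).getD k

-- the loop bodies of the ports are the pvStep functions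
theorem pvA1_eq : (fun (acc : List Char) i =>
    if PySem.Chars.lowerChar i ∈ changerAlphabet then
      acc ++ (PySem.List.pyGet? changerAlphabet
        (((PySem.List.index? changerAlphabet (PySem.Chars.lowerChar i)).getD 0 : Int) + 1)).toList
    else
      acc ++ [i]) = (fun acc i => acc ++ pvStepA1 i) := by
  funext acc i; unfold pvStepA1; split <;> rfl

theorem pvA2_eq : (fun (acc : List Char) i =>
    if i ∈ "aeiou".toList then
      acc ++ [PySem.Chars.upperChar i]
    else
      acc ++ [PySem.Chars.lowerChar i]) = (fun acc i => acc ++ [pvStepA2 i]) := by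
  funext acc i; unfold pvStepA2; split <;> rfl

-- per-character agreement on the ASCII domain, checked over all codes ≤ 126
theorem pvStep_agree (c : Char) (h : pvDomChar c = true) :
    (pvStepA1 c).map pvStepA2 = [pvStepB c] := by
  have hlt : c.toNat < 127 := by
    simp only [pvDomChar, Bool.or_eq_true, Bool.and_eq_true, decide_eq_true_eq,
      beq_iff_eq] at h
    omega
  have hall : ∀ n : Fin 127,
      (pvStepA1 (Char.ofNat n)).map pvStepA2 = [pvStepB (Char.ofNat n)] := by decide
  have := hall ⟨c.toNat, hlt⟩
  simpa [Char.ofNat_toNat] using this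

theorem pvStepA1_flat (l : List Char) :
    (l.foldl (fun acc i => acc ++ pvStepA1 i) []) = l.flatMap pvStepA1 := by
  induction l using List.reverseRecOn with
  | nil => rfl
  | append_singleton xs x ih => simp [List.foldl_append, ih]

theorem pv_changer_eq (l : List Char) (h : l.all pvDomChar = true) :
    ((l.foldl (fun acc i => acc ++ pvStepA1 i) []).foldl
      (fun acc i => acc ++ [pvStepA2 i]) []) = l.map pvStepB := by
  rw [pvStepA1_flat, PySem.List.foldl_append_singleton_eq_map]
  simp only [List.nil_append]
  induction l with
  | nil => rfl
  | cons x xs ih =>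
      simp only [List.all_cons, Bool.and_eq_true] at h
      simp [List.flatMap_cons, pvStep_agree x h.1, ih h.2]

-- ===== VERDICT (by name: the statement is the Claim_ definition above) =====
theorem changer_spec : Claim_equal_changer := by
  intro s hdom
  unfold Spec_changer changer changer_alt
  rw [pvA1_eq, pvA2_eq]
  exact congrArg String.ofList (pv_changer_eq s.toList hdom)
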